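-- pv_equiv track=rewrite | github.com/thefrederiksen/cc_tools | src/cc-trisight/skills/desktop/desktop_keys.py | _build_slow_type_ps
-- ===== SOURCE A (Python) =====
-- _SPECIAL = {
--     "+": "{+}", "^": "{^}", "%": "{%}", "~": "{~}",
--     "(": "{(}", ")": "{)}", "{": "{{}", "}": "{}}",
-- }
--
-- def _build_slow_type_ps(text: str, delay_ms: int) -> str:
--     """Build a PowerShell script that types one character at a time with delay.
--
--     Supports \\n (literal backslash-n in the input) as Enter key presses,
--     so the agent can type multi-line text in a single call.
--     """
--     lines = ["Add-Type -AssemblyName System.Windows.Forms"]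
--     # Split on literal \n sequences to handle newlines
--     parts = text.replace("\\n", "\n").split("\n")
--     for i, part in enumerate(parts):
--         # Type each character in this line
--         for ch in part:
--             escaped = _SPECIAL.get(ch, ch)
--             ps_escaped = escaped.replace("'", "''")
--             lines.append(f"[System.Windows.Forms.SendKeys]::SendWait('{ps_escaped}')")
--             if delay_ms > 0:
--                 lines.append(f"Start-Sleep -Milliseconds {delay_ms}")
--         # Press Enter between lines (not after the last one)
--         if i < len(parts) - 1:
--             lines.append("[System.Windows.Forms.SendKeys]::SendWait('{ENTER}')")
--             if delay_ms > 0: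
--                 lines.append(f"Start-Sleep -Milliseconds {delay_ms}")
--     return "; ".join(lines)
-- ===== SOURCE B (Python) =====
-- _SPECIAL = {
--     "+": "{+}", "^": "{^}", "%": "{%}", "~": "{~}",
--     "(": "{(}", ")": "{)}", "{": "{{}", "}": "{}}",
-- }
--
-- def _build_slow_type_ps(text: str, delay_ms: int) -> str:
--     """Single pass: walk the newline-expanded text once; a '\n' char becomes an
--     ENTER keypress, any other char a SendWait of its escaped form."""
--     lines = ["Add-Type -AssemblyName System.Windows.Forms"]
--     for ch in text.replace("\\n", "\n"):
--         if ch == "\n":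
--             lines.append("[System.Windows.Forms.SendKeys]::SendWait('{ENTER}')")
--         else:
--             esc = _SPECIAL.get(ch, ch).replace("'", "''")
--             lines.append(f"[System.Windows.Forms.SendKeys]::SendWait('{esc}')")
--         if delay_ms > 0:
--             lines.append(f"Start-Sleep -Milliseconds {delay_ms}")
--     return "; ".join(lines)
-- ===== Notes on version B (the rewrite author's own statement) =====
-- stated objective: simpler
-- what changed: Drops the split-on-newline list plus nested enumerate loop with its last-part index test; B walks the expanded string once, emitting an ENTER line for a newline char and a SendWait line otherwise.
import Mathlib
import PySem

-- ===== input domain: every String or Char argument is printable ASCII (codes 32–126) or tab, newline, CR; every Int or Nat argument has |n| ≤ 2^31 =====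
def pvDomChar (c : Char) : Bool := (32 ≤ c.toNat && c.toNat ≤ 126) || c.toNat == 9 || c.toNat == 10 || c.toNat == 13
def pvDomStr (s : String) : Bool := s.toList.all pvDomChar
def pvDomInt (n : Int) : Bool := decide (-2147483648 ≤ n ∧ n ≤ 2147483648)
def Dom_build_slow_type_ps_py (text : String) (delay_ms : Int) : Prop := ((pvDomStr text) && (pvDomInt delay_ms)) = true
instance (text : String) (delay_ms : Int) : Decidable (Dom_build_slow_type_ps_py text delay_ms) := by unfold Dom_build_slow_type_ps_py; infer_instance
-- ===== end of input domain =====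

-- B replaces A's split-on-newline plus nested enumerate loop by a single pass over the
-- expanded text (objective: simpler); return values are proved identical on all inputs.

-- shared module constant _SPECIAL and the literal line templates (f-strings) of the Python module
def pvSPECIAL : PySem.Dict Char (List Char) :=
  ⟨[('+', "{+}".toList), ('^', "{^}".toList), ('%', "{%}".toList), ('~', "{~}".toList),
    ('(', "{(}".toList), (')', "{)}".toList), ('{', "{{}".toList), ('}', "{}}".toList)]⟩

-- _SPECIAL.get(ch, ch) followed by .replace("'", "''")
def pvEscape (ch : Char) : List Char :=
  PySem.Chars.replace (PySem.Dict.getD pvSPECIAL ch [ch]) ['\''] ['\'', '\'']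

def pvSendWait (esc : List Char) : List Char :=
  "[System.Windows.Forms.SendKeys]::SendWait('".toList ++ esc ++ "')".toList

def pvEnter : List Char := "[System.Windows.Forms.SendKeys]::SendWait('{ENTER}')".toList

def pvSleep (delay_ms : Int) : List Char :=
  "Start-Sleep -Milliseconds ".toList ++ PySem.Int.toChars delay_ms

-- ===== PORT A =====
def build_slow_type_ps_py (text : String) (delay_ms : Int) : String :=
  let lines : List (List Char) := ["Add-Type -AssemblyName System.Windows.Forms".toList]
  let parts := PySem.Chars.splitOn (PySem.Chars.replace text.toList ['\\', 'n'] ['\n']) ['\n']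
  let lines := (PySem.List.enumerate parts).foldl (fun lines ip =>
    let lines := ip.2.foldl (fun lines ch =>
      let lines := lines ++ [pvSendWait (pvEscape ch)]
      if delay_ms > 0 then lines ++ [pvSleep delay_ms] else lines) lines
    if ip.1 < (parts.length : Int) - 1 then
      let lines := lines ++ [pvEnter]
      if delay_ms > 0 then lines ++ [pvSleep delay_ms] else lines
    else lines) lines
  String.ofList (PySem.Chars.join "; ".toList lines)

-- ===== PORT B =====
def build_slow_type_ps_py_alt (text : String) (delay_ms : Int) : String :=
  let s := PySem.Chars.replace text.toList ['\\', 'n'] ['\n']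
  let lines := s.foldl (fun lines ch =>
    let lines := lines ++ [if ch == '\n' then pvEnter else pvSendWait (pvEscape ch)]
    if delay_ms > 0 then lines ++ [pvSleep delay_ms] else lines)
    ["Add-Type -AssemblyName System.Windows.Forms".toList]
  String.ofList (PySem.Chars.join "; ".toList lines)

-- ===== PRECONDITION & SPEC =====
def Spec_build_slow_type_ps_py (text : String) (delay_ms : Int) (out : String) : Prop := out = build_slow_type_ps_py_alt text delay_ms
instance (text : String) (delay_ms : Int) (out : String) : Decidable (Spec_build_slow_type_ps_py text delay_ms out) := by unfold Spec_build_slow_type_ps_py; infer_instance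

-- ===== CLAIM (what is proved, stated in full; the proofs are below) =====
def Claim_equal_build_slow_type_ps_py : Prop := ∀ (text : String) (delay_ms : Int), Dom_build_slow_type_ps_py text delay_ms → Spec_build_slow_type_ps_py text delay_ms (build_slow_type_ps_py text delay_ms)

-- ===== LEMMAS AND PROOFS =====

-- A's per-character loop body and its fold over a part
def pvStepA (d : Int) (lines : List (List Char)) (ch : Char) : List (List Char) :=
  let lines := lines ++ [pvSendWait (pvEscape ch)]
  if d > 0 then lines ++ [pvSleep d] else lines

def pvChFold (d : Int) (p : List Char) (acc : List (List Char)) : List (List Char) :=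
  p.foldl (pvStepA d) acc

def pvAfterEnter (d : Int) (acc : List (List Char)) : List (List Char) :=
  let lines := acc ++ [pvEnter]
  if d > 0 then lines ++ [pvSleep d] else lines

-- A's outer loop, with the 'i < len(parts)-1' test resolved into 'not the last part'
def pvProcA (d : Int) : List (List Char) → List (List Char) → List (List Char)
  | [], acc => acc
  | [p], acc => pvChFold d p acc
  | p :: q :: ps, acc => pvProcA d (q :: ps) (pvAfterEnter d (pvChFold d p acc))

-- B's per-character loop body
def pvStepB (d : Int) (lines : List (List Char)) (ch : Char) : List (List Char) :=
  let lines := lines ++ [if ch == '\n' then pvEnter else pvSendWait (pvEscape ch)]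
  if d > 0 then lines ++ [pvSleep d] else lines

-- structural restatement of PySem.Chars.splitOn on the single-char separator '\n'
def pvSplitNL : List Char → List (List Char)
  | [] => [[]]
  | c :: rest => if c = '\n' then [] :: pvSplitNL rest else (pvSplitNL rest).modifyHead (c :: ·)

theorem pvSplitNL_cons_nl (rest : List Char) : pvSplitNL ('\n' :: rest) = [] :: pvSplitNL rest := by
  simp [pvSplitNL]

theorem pvSplitNL_cons_ne {c : Char} (hc : c ≠ '\n') (rest : List Char) :
    pvSplitNL (c :: rest) = (pvSplitNL rest).modifyHead (c :: ·) := by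
  simp [pvSplitNL, hc]

theorem pvSplitNL_ne_nil (cs : List Char) : pvSplitNL cs ≠ [] := by
  induction cs with
  | nil => simp [pvSplitNL]
  | cons c rest ih =>
    by_cases hc : c = '\n'
    · subst hc; rw [pvSplitNL_cons_nl]; simp
    · rw [pvSplitNL_cons_ne hc]
      cases h : pvSplitNL rest with
      | nil => exact absurd h ih
      | cons p ps => simp [List.modifyHead]

theorem pvSplitOn_go_eq (fuel : Nat) :
    ∀ (l cur : List Char) (acc : List (List Char)), l.length < fuel →
      PySem.Chars.splitOn.go ['\n'] fuel l cur acc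
        = acc.reverse ++ (pvSplitNL l).modifyHead (cur.reverse ++ ·) := by
  induction fuel with
  | zero => intro l cur acc h; omega
  | succ fuel ih =>
    intro l cur acc h
    cases l with
    | nil => simp [PySem.Chars.splitOn.go, pvSplitNL, List.modifyHead]
    | cons c rest =>
      simp only [PySem.Chars.splitOn.go]
      by_cases hc : c = '\n'
      · subst hc
        rw [if_pos (by simp [List.isPrefixOf])]
        rw [show List.drop ['\n'].length ('\n' :: rest) = rest from rfl]
        rw [ih rest [] (List.reverse cur :: acc) (by simpa using Nat.lt_of_succ_lt_succ h)]
        rw [pvSplitNL_cons_nl]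
        simp only [List.modifyHead, List.reverse_nil, List.nil_append, List.reverse_cons,
          List.cons_append, List.append_assoc]
        cases pvSplitNL rest <;> simp
      · rw [if_neg (by simp [List.isPrefixOf]; exact Ne.symm hc)]
        rw [ih rest (c :: cur) acc (by simpa using Nat.lt_of_succ_lt_succ h)]
        rw [pvSplitNL_cons_ne hc]
        rcases hsp : pvSplitNL rest with _ | ⟨p, ps⟩
        · exact absurd hsp (pvSplitNL_ne_nil rest)
        · simp only [List.modifyHead, List.reverse_cons, List.append_assoc, List.cons_append,
            List.nil_append]

theorem pvSplitOn_eq (cs : List Char) :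
    PySem.Chars.splitOn cs ['\n'] = pvSplitNL cs := by
  show PySem.Chars.splitOn.go ['\n'] (cs.length + 1) cs [] [] = _
  rw [pvSplitOn_go_eq (cs.length + 1) cs [] [] (by omega)]
  have : (pvSplitNL cs).modifyHead (([] : List Char).reverse ++ ·) = pvSplitNL cs := by
    cases h : pvSplitNL cs <;> simp [List.modifyHead]
  simpa using this

-- A's enumerate fold is pvProcA whenever the start index + remaining length equals n
theorem pvEnumFold_eq (d : Int) (n : Int) :
    ∀ (tail : List (List Char)) (k : Int) (acc : List (List Char)),
      k + (tail.length : Int) = n →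
      (PySem.List.enumerate tail k).foldl (fun lines ip =>
        (if ip.1 < n - 1 then pvAfterEnter d (pvChFold d ip.2 lines)
         else pvChFold d ip.2 lines)) acc
        = pvProcA d tail acc := by
  intro tail
  induction tail with
  | nil => intro k acc hk; simp [PySem.List.enumerate, pvProcA]
  | cons p rest ih =>
    intro k acc hk
    rw [PySem.List.enumerate_cons, List.foldl_cons]
    cases rest with
    | nil =>
      have hk' : ¬ (k < n - 1) := by simp at hk; omega
      simp only [hk', if_false]
      simp [PySem.List.enumerate, pvProcA]
    | cons q ps =>
      have hk' : k < n - 1 := by simp at hk; omega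
      simp only [hk', if_true]
      rw [ih (k + 1) _ (by simp at hk ⊢; omega)]
      rfl

theorem pvProcA_nil_cons (d : Int) (L : List (List Char)) (hL : L ≠ []) (acc : List (List Char)) :
    pvProcA d ([] :: L) acc = pvProcA d L (pvAfterEnter d acc) := by
  rcases L with _ | ⟨p, ps⟩
  · exact absurd rfl hL
  · simp [pvProcA, pvChFold]

theorem pvModifyHead_procA (d : Int) (c : Char) (L : List (List Char)) (hL : L ≠ [])
    (acc : List (List Char)) :
    pvProcA d (L.modifyHead (c :: ·)) acc = pvProcA d L (pvStepA d acc c) := by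
  rcases L with _ | ⟨p, ps⟩
  · exact absurd rfl hL
  · rcases ps with _ | ⟨q, ps'⟩
    · simp [List.modifyHead, pvProcA, pvChFold]
    · simp [List.modifyHead, pvProcA, pvChFold]

-- the heart: A's split-and-loop over the parts equals B's single pass over the chars
theorem pvProcA_eq_foldB (d : Int) :
    ∀ (cs : List Char) (acc : List (List Char)),
      pvProcA d (pvSplitNL cs) acc = cs.foldl (pvStepB d) acc := by
  intro cs
  induction cs with
  | nil => intro acc; simp [pvSplitNL, pvProcA, pvChFold]
  | cons c rest ih =>
    intro acc
    by_cases hc : c = '\n'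
    · subst hc
      rw [pvSplitNL_cons_nl, pvProcA_nil_cons d _ (pvSplitNL_ne_nil rest), ih,
        List.foldl_cons]
      have hstep : pvStepB d acc '\n' = pvAfterEnter d acc := by
        simp [pvStepB, pvAfterEnter]
      rw [hstep]
    · rw [pvSplitNL_cons_ne hc]
      rw [pvModifyHead_procA d c _ (pvSplitNL_ne_nil rest), ih]
      have : pvStepA d acc c = pvStepB d acc c := by
        simp [pvStepA, pvStepB, hc]
      rw [this]
      simp [List.foldl_cons]

-- definitional restatements of the two ports in terms of the named loop bodies
theorem pvPortA_eq (text : String) (d : Int) :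
    build_slow_type_ps_py text d = String.ofList (PySem.Chars.join "; ".toList
      ((PySem.List.enumerate (PySem.Chars.splitOn (PySem.Chars.replace text.toList ['\\', 'n'] ['\n']) ['\n'])).foldl
        (fun lines ip =>
          if ip.1 < ((PySem.Chars.splitOn (PySem.Chars.replace text.toList ['\\', 'n'] ['\n']) ['\n']).length : Int) - 1
          then pvAfterEnter d (pvChFold d ip.2 lines) else pvChFold d ip.2 lines)
        ["Add-Type -AssemblyName System.Windows.Forms".toList])) := rfl

theorem pvPortB_eq (text : String) (d : Int) :
    build_slow_type_ps_py_alt text d = String.ofList (PySem.Chars.join "; ".toList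
      ((PySem.Chars.replace text.toList ['\\', 'n'] ['\n']).foldl (pvStepB d)
        ["Add-Type -AssemblyName System.Windows.Forms".toList])) := rfl

-- ===== VERDICT (by name: the statement is the Claim_ definition above) =====
theorem build_slow_type_ps_py_spec : Claim_equal_build_slow_type_ps_py := by
  intro text delay_ms _
  show build_slow_type_ps_py text delay_ms = build_slow_type_ps_py_alt text delay_ms
  rw [pvPortA_eq, pvPortB_eq, pvSplitOn_eq]
  rw [pvEnumFold_eq delay_ms ((pvSplitNL (PySem.Chars.replace text.toList ['\\', 'n'] ['\n'])).length : Int)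
        _ 0 _ (by simp)]
  rw [pvProcA_eq_foldB]
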